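-- pv_equiv track=rewrite | github.com/Ko-Donghwan/paper | ai_model_data/collect_ai_model_csv.py | process_tags
-- ===== SOURCE A (Python) =====
-- def process_tags(tags):
--     tag_map = {key: None for key in ['arxiv:', 'dataset:', 'region:', 'license:']}
--     new_tags = []
--
--     for tag in tags:
--         lower_tag = tag.lower()
--         for key in tag_map:
--             if lower_tag.startswith(key):
--                 tag_map[key] = tag
--                 break
--         else:
--             new_tags.append(tag)
--
--     return tuple(tag_map.values()) + (new_tags,)
-- ===== SOURCE B (Python) =====
-- PREFIXES = ('arxiv:', 'dataset:', 'region:', 'license:')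
--
-- def process_tags(tags):
--     a, d, r, l = (next((t for t in reversed(tags) if t.lower().startswith(p)), None)
--                   for p in PREFIXES)
--     new_tags = [t for t in tags if not t.lower().startswith(PREFIXES)]
--     return (a, d, r, l, new_tags)
-- ===== Notes on version B (the rewrite author's own statement) =====
-- stated objective: simpler
-- what changed: Replaces the interleaved single pass that mutates a prefix->tag dict with a break/else loop by four independent last-match scans (next over reversed(tags)) plus one filtering comprehension for the leftovers.
import Mathlib
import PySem

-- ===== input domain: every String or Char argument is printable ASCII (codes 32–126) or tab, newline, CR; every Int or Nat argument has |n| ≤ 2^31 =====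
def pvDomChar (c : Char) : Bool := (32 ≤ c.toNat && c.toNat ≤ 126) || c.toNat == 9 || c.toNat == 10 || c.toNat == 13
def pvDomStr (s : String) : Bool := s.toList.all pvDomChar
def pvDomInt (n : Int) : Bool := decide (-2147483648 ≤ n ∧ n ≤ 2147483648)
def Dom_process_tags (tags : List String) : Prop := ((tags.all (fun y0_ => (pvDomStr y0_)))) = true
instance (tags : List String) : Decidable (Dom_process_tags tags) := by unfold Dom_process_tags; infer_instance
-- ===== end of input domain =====

-- B computes each prefix category by an independent last-match scan and the leftovers by one
-- filter, instead of A's single interleaved pass mutating a prefix->tag dict with for/break/else.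
-- ===== PORT A =====
-- step of A's 'for tag in tags' loop: for/break over the dict keys, else append to new_tags
def pvStepA (st : PySem.Dict String (Option String) × List String) (tag : String) :
    PySem.Dict String (Option String) × List String :=
  let lower_tag := PySem.Str.lower tag
  match st.1.keys.find? (fun key => PySem.Chars.startswith lower_tag.toList key.toList) with
  | some key => (st.1.insert key tag, st.2)
  | none => (st.1, st.2 ++ [tag])

def process_tags (tags : List String) : Option String × Option String × Option String × Option String × List String :=
  let tag_map : PySem.Dict String (Option String) :=
    PySem.Dict.ofList ((["arxiv:", "dataset:", "region:", "license:"]).map (fun key => (key, (none : Option String))))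
  let st := tags.foldl pvStepA (tag_map, ([] : List String))
  -- tuple(tag_map.values()) + (new_tags,): the dict always keeps exactly the four keys,
  -- so the fallback branch of this match is unreachable
  match st.1.values with
  | [a, d, r, l] => (a, d, r, l, st.2)
  | _ => (none, none, none, none, st.2)

-- ===== PORT B =====
-- next((t for t in reversed(tags) if t.lower().startswith(p)), None)
def pvLastPref (tags : List String) (p : String) : Option String :=
  tags.reverse.find? (fun t => PySem.Chars.startswith (PySem.Str.lower t).toList p.toList)

def process_tags_alt (tags : List String) : Option String × Option String × Option String × Option String × List String :=
  (pvLastPref tags "arxiv:", pvLastPref tags "dataset:", pvLastPref tags "region:", pvLastPref tags "license:",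
   tags.filter (fun t =>
     !(["arxiv:", "dataset:", "region:", "license:"].any
        (fun p => PySem.Chars.startswith (PySem.Str.lower t).toList p.toList))))

-- ===== PRECONDITION & SPEC =====
def Spec_process_tags (tags : List String) (out : Option String × Option String × Option String × Option String × List String) : Prop := out = process_tags_alt tags
instance (tags : List String) (out : Option String × Option String × Option String × Option String × List String) : Decidable (Spec_process_tags tags out) := by unfold Spec_process_tags; infer_instance

-- ===== CLAIM (what is proved, stated in full; the proofs are below) =====
def Claim_equal_process_tags : Prop := ∀ (tags : List String), Dom_process_tags tags → Spec_process_tags tags (process_tags tags)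

-- ===== LEMMAS AND PROOFS =====

def pvDict4 (a d r l : Option String) : PySem.Dict String (Option String) :=
  PySem.Dict.mk [("arxiv:", a), ("dataset:", d), ("region:", r), ("license:", l)]

-- a string cannot start with two of the four prefixes: they are pairwise not prefixes of each other
theorem pv_excl {s p q : List Char} (h1 : PySem.Chars.startswith s p = true)
    (h2 : PySem.Chars.startswith s q = true) (hnp : ¬ p <+: q) (hnq : ¬ q <+: p) : False := by
  rw [PySem.Chars.startswith_iff] at h1 h2
  rcases List.prefix_or_prefix_of_prefix h1 h2 with h | h <;> contradiction

theorem pv_loop (ts : List String) : ∀ (a d r l : Option String) (acc : List String),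
    ts.foldl pvStepA (pvDict4 a d r l, acc)
      = (pvDict4 ((pvLastPref ts "arxiv:").or a) ((pvLastPref ts "dataset:").or d)
          ((pvLastPref ts "region:").or r) ((pvLastPref ts "license:").or l),
         acc ++ ts.filter (fun t =>
           !(["arxiv:", "dataset:", "region:", "license:"].any
              (fun p => PySem.Chars.startswith (PySem.Str.lower t).toList p.toList)))) := by
  induction ts with
  | nil => intro a d r l acc; simp [pvLastPref]
  | cons t ts ih =>
    intro a d r l acc
    simp only [List.foldl_cons]
    by_cases h1 : PySem.Chars.startswith (PySem.Chars.lower t.toList) "arxiv:".toList = true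
    · simp at h1
      rw [show pvStepA (pvDict4 a d r l, acc) t = (pvDict4 (some t) d r l, acc) by
            simp [pvStepA, pvDict4, PySem.Dict.keys, PySem.Dict.insert, h1], ih]
      have h2 : PySem.Chars.startswith (PySem.Chars.lower t.toList) "dataset:".toList = false := by
        by_contra hc; simp at hc; exact pv_excl h1 hc (by decide) (by decide)
      have h3 : PySem.Chars.startswith (PySem.Chars.lower t.toList) "region:".toList = false := by
        by_contra hc; simp at hc; exact pv_excl h1 hc (by decide) (by decide)
      have h4 : PySem.Chars.startswith (PySem.Chars.lower t.toList) "license:".toList = false := by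
        by_contra hc; simp at hc; exact pv_excl h1 hc (by decide) (by decide)
      simp at h2 h3 h4
      simp [pvLastPref, List.find?_append, h1, h2, h3, h4]
    · simp at h1
      by_cases h2 : PySem.Chars.startswith (PySem.Chars.lower t.toList) "dataset:".toList = true
      · simp at h2
        rw [show pvStepA (pvDict4 a d r l, acc) t = (pvDict4 a (some t) r l, acc) by
              simp [pvStepA, pvDict4, PySem.Dict.keys, PySem.Dict.insert, h1, h2], ih]
        have h3 : PySem.Chars.startswith (PySem.Chars.lower t.toList) "region:".toList = false := by
          by_contra hc; simp at hc; exact pv_excl h2 hc (by decide) (by decide)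
        have h4 : PySem.Chars.startswith (PySem.Chars.lower t.toList) "license:".toList = false := by
          by_contra hc; simp at hc; exact pv_excl h2 hc (by decide) (by decide)
        simp at h3 h4
        simp [pvLastPref, List.find?_append, h1, h2, h3, h4]
      · simp at h2
        by_cases h3 : PySem.Chars.startswith (PySem.Chars.lower t.toList) "region:".toList = true
        · simp at h3
          rw [show pvStepA (pvDict4 a d r l, acc) t = (pvDict4 a d (some t) l, acc) by
                simp [pvStepA, pvDict4, PySem.Dict.keys, PySem.Dict.insert, h1, h2, h3], ih]
          have h4 : PySem.Chars.startswith (PySem.Chars.lower t.toList) "license:".toList = false := by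
            by_contra hc; simp at hc; exact pv_excl h3 hc (by decide) (by decide)
          simp at h4
          simp [pvLastPref, List.find?_append, h1, h2, h3, h4]
        · simp at h3
          by_cases h4 : PySem.Chars.startswith (PySem.Chars.lower t.toList) "license:".toList = true
          · simp at h4
            rw [show pvStepA (pvDict4 a d r l, acc) t = (pvDict4 a d r (some t), acc) by
                  simp [pvStepA, pvDict4, PySem.Dict.keys, PySem.Dict.insert, h1, h2, h3, h4], ih]
            simp [pvLastPref, List.find?_append, h1, h2, h3, h4]
          · simp at h4
            rw [show pvStepA (pvDict4 a d r l, acc) t = (pvDict4 a d r l, acc ++ [t]) by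
                  simp [pvStepA, pvDict4, PySem.Dict.keys, h1, h2, h3, h4], ih]
            simp [pvLastPref, List.find?_append, h1, h2, h3, h4]

-- ===== VERDICT (by name: the statement is the Claim_ definition above) =====
theorem process_tags_spec : Claim_equal_process_tags := by
  intro tags _
  unfold Spec_process_tags
  simp only [process_tags, process_tags_alt]
  rw [show PySem.Dict.ofList ((["arxiv:", "dataset:", "region:", "license:"] : List String).map
        (fun key => (key, (none : Option String)))) = pvDict4 none none none none from by decide,
      pv_loop]
  simp [pvDict4]
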